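-- pv_equiv track=rewrite | github.com/silvernuke911/Random-programs | vectors.py | vcrs
-- ===== SOURCE A (Python) =====
-- def levi_civita(i,j,k):
--     indexorder=str(i)+str(j)+str(k)
--     if indexorder in "01201":
--         return 1
--     elif indexorder in "21021":
--         return -1
--     else: return 0
--
-- def vcrs(vector1,vector2):
--     output=[]
--     for i in range(3):
--         sum=0
--         for j in range(3):
--             for k in range(3):
--                 prod=levi_civita(i,j,k)*vector1[j]*vector2[k]
--                 sum+=prod
--         output.append(sum)
--     return output
-- ===== SOURCE B (Python) =====
-- def vcrs(vector1, vector2):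
--     # Direct closed-form 3D cross product; same [0..2] indexing as A,
--     # so the same IndexError behaviour on short inputs.
--     return [vector1[1] * vector2[2] - vector1[2] * vector2[1],
--             vector1[2] * vector2[0] - vector1[0] * vector2[2],
--             vector1[0] * vector2[1] - vector1[1] * vector2[0]]
-- ===== Notes on version B (the rewrite author's own statement) =====
-- stated objective: simpler
-- what changed: Replaces the Levi-Civita symbol lookup (string membership) and the 3x3x3 triple loop with the closed-form three antisymmetric differences of the cross product.
import Mathlib
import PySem

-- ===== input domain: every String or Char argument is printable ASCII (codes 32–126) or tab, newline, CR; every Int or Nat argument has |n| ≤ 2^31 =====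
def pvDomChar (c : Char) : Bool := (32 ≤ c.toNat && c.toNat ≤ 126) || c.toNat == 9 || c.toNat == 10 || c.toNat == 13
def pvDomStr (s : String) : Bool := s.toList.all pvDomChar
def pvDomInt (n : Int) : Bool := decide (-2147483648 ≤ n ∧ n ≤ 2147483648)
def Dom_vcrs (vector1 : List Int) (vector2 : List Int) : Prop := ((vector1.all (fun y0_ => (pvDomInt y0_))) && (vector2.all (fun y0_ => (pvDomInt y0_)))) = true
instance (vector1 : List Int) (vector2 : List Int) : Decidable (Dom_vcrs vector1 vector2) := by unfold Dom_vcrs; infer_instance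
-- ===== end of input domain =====

-- B replaces A's Levi-Civita string lookup and 3x3x3 triple loop by the closed-form
-- three antisymmetric differences of the 3D cross product (objective: simpler).


-- ===== PORT A =====
def levi_civita (i : Int) (j : Int) (k : Int) : Int :=
  -- str(i)+str(j)+str(k); 'sub in s' is PySem.Chars.isIn (on the char-list side)
  let indexorder := PySem.Int.toChars i ++ PySem.Int.toChars j ++ PySem.Int.toChars k
  if PySem.Chars.isIn indexorder "01201".toList then 1
  else if PySem.Chars.isIn indexorder "21021".toList then -1
  else 0

-- vector[j] raises IndexError for lists shorter than 3; Pre_vcrs excludes that,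
-- so the default of pyGetD is never reached inside the claim.
def vcrs (vector1 : List Int) (vector2 : List Int) : List Int :=
  (PySem.List.pyRange 0 3 1).foldl (fun output i =>
    let sum := (PySem.List.pyRange 0 3 1).foldl (fun sum j =>
      (PySem.List.pyRange 0 3 1).foldl (fun sum k =>
        sum + levi_civita i j k * PySem.List.pyGetD vector1 j 0 * PySem.List.pyGetD vector2 k 0)
        sum) 0
    output ++ [sum]) []

-- ===== PORT B =====
def vcrs_alt (vector1 : List Int) (vector2 : List Int) : List Int :=
  [PySem.List.pyGetD vector1 1 0 * PySem.List.pyGetD vector2 2 0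
     - PySem.List.pyGetD vector1 2 0 * PySem.List.pyGetD vector2 1 0,
   PySem.List.pyGetD vector1 2 0 * PySem.List.pyGetD vector2 0 0
     - PySem.List.pyGetD vector1 0 0 * PySem.List.pyGetD vector2 2 0,
   PySem.List.pyGetD vector1 0 0 * PySem.List.pyGetD vector2 1 0
     - PySem.List.pyGetD vector1 1 0 * PySem.List.pyGetD vector2 0 0]

-- ===== PRECONDITION & SPEC =====
-- Both Pythons index positions 0..2 and raise IndexError on shorter lists.
def Pre_vcrs (vector1 : List Int) (vector2 : List Int) : Prop :=
  3 ≤ vector1.length ∧ 3 ≤ vector2.length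
instance (vector1 : List Int) (vector2 : List Int) : Decidable (Pre_vcrs vector1 vector2) := by unfold Pre_vcrs; infer_instance
def pvWitness_vcrs : List Int × List Int := ([1, 2, 3], [4, 5, 6])

def Spec_vcrs (vector1 : List Int) (vector2 : List Int) (out : List Int) : Prop := out = vcrs_alt vector1 vector2
instance (vector1 : List Int) (vector2 : List Int) (out : List Int) : Decidable (Spec_vcrs vector1 vector2 out) := by unfold Spec_vcrs; infer_instance

-- ===== CLAIM (what is proved, stated in full; the proofs are below) =====
def Claim_equal_vcrs : Prop := ∀ (vector1 : List Int) (vector2 : List Int), Dom_vcrs vector1 vector2 → Pre_vcrs vector1 vector2 → Spec_vcrs vector1 vector2 (vcrs vector1 vector2)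

-- ===== LEMMAS AND PROOFS =====
theorem pyRange03 : PySem.List.pyRange 0 3 1 = [0, 1, 2] := by decide

-- ===== VERDICT (by name: the statement is the Claim_ definition above) =====
theorem vcrs_spec : Claim_equal_vcrs := by
  intro v1 v2 _ pre
  obtain ⟨h1, h2⟩ := pre
  rcases v1 with _ | ⟨a, _ | ⟨b, _ | ⟨c, t1⟩⟩⟩ <;> simp at h1
  rcases v2 with _ | ⟨d, _ | ⟨e, _ | ⟨f, t2⟩⟩⟩ <;> simp at h2
  unfold Spec_vcrs vcrs vcrs_alt
  have e000 : levi_civita 0 0 0 = 0 := by decide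
  have e001 : levi_civita 0 0 1 = 0 := by decide
  have e002 : levi_civita 0 0 2 = 0 := by decide
  have e010 : levi_civita 0 1 0 = 0 := by decide
  have e011 : levi_civita 0 1 1 = 0 := by decide
  have e012 : levi_civita 0 1 2 = 1 := by decide
  have e020 : levi_civita 0 2 0 = 0 := by decide
  have e021 : levi_civita 0 2 1 = (-1) := by decide
  have e022 : levi_civita 0 2 2 = 0 := by decide
  have e100 : levi_civita 1 0 0 = 0 := by decide
  have e101 : levi_civita 1 0 1 = 0 := by decide
  have e102 : levi_civita 1 0 2 = (-1) := by decide
  have e110 : levi_civita 1 1 0 = 0 := by decide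
  have e111 : levi_civita 1 1 1 = 0 := by decide
  have e112 : levi_civita 1 1 2 = 0 := by decide
  have e120 : levi_civita 1 2 0 = 1 := by decide
  have e121 : levi_civita 1 2 1 = 0 := by decide
  have e122 : levi_civita 1 2 2 = 0 := by decide
  have e200 : levi_civita 2 0 0 = 0 := by decide
  have e201 : levi_civita 2 0 1 = 1 := by decide
  have e202 : levi_civita 2 0 2 = 0 := by decide
  have e210 : levi_civita 2 1 0 = (-1) := by decide
  have e211 : levi_civita 2 1 1 = 0 := by decide
  have e212 : levi_civita 2 1 2 = 0 := by decide
  have e220 : levi_civita 2 2 0 = 0 := by decide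
  have e221 : levi_civita 2 2 1 = 0 := by decide
  have e222 : levi_civita 2 2 2 = 0 := by decide
  rw [pyRange03]
  simp only [List.foldl]
  simp only [e000, e001, e002, e010, e011, e012, e020, e021, e022,
             e100, e101, e102, e110, e111, e112, e120, e121, e122,
             e200, e201, e202, e210, e211, e212, e220, e221, e222]
  simp [PySem.List.pyGetD, PySem.List.pyGet?, PySem.List.pyIdx?]
  refine ⟨?_, ?_, ?_⟩ <;> ring
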